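-- pv_equiv track=rewrite | github.com/limit5/OmniSight-Productizer | backend/design_token_loader.py | _split_declarations
-- ===== SOURCE A (Python) =====
-- def _split_declarations(body: str) -> list[str]:
--     """Split a declaration list on ``;`` while respecting parentheses.
--
--     We cannot use a plain ``.split(";")`` because values like
--     ``rgba(0, 0, 0, 0.5)`` do not contain semicolons but ``oklch(0.5 0
--     0 / 0.5)`` might contain a slash, and nested ``var(a, var(b))``
--     may contain commas.  Semicolons only terminate declarations when
--     paren-depth is zero.
--     """
--     out: list[str] = []
--     depth = 0
--     buf: list[str] = []
--     for ch in body: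
--         if ch == "(":
--             depth += 1
--             buf.append(ch)
--         elif ch == ")":
--             depth = max(0, depth - 1)
--             buf.append(ch)
--         elif ch == ";" and depth == 0:
--             out.append("".join(buf))
--             buf = []
--         else:
--             buf.append(ch)
--     if buf:
--         out.append("".join(buf))
--     return out
-- ===== SOURCE B (Python) =====
-- def _split_declarations(body: str) -> list[str]:
--     # Pass 1: record the index of every top-level (paren-depth 0) semicolon.
--     depth = 0
--     cuts: list[int] = []
--     for i, ch in enumerate(body):
--         if ch == "(":
--             depth += 1
--         elif ch == ")":
--             depth = max(0, depth - 1)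
--         elif ch == ";" and depth == 0:
--             cuts.append(i)
--     # Pass 2: slice body between consecutive cuts; keep intermediate empty
--     # segments, append the tail only if non-empty.
--     segs: list[str] = []
--     start = 0
--     for c in cuts:
--         segs.append(body[start:c])
--         start = c + 1
--     tail = body[start:]
--     if tail:
--         segs.append(tail)
--     return segs
-- ===== Notes on version B (the rewrite author's own statement) =====
-- stated objective: alternative
-- what changed: Replaces the single pass that accumulates a character buffer with two passes: one that collects the indices of top-level semicolons, and one that reconstructs the segments by slicing the string between consecutive cut indices.
import Mathlib
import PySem

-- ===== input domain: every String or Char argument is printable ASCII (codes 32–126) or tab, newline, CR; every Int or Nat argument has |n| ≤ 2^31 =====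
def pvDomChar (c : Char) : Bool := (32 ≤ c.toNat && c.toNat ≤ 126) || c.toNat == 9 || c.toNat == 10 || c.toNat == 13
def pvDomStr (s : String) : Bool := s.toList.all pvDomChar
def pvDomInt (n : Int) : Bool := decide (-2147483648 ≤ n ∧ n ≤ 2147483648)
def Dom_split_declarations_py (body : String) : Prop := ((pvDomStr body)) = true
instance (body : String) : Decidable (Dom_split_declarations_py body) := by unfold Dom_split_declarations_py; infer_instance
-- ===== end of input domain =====

-- B replaces A's buffer-accumulating single pass by two passes (collect top-level ';' indices, then slice
-- between them); equivalence of return values proved on all of Dom (objective: alternative decomposition).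


-- ===== PORT A =====
-- A's for-loop over the characters, state (out, depth, buf); "".join(buf) is String.ofList buf;
-- the trailing 'if buf: out.append(...)' is the base case.
def aLoop : List Char → List String → Int → List Char → List String
  | [], out, _, buf => if buf.isEmpty then out else out ++ [String.ofList buf]
  | c :: t, out, d, buf =>
    if c = '(' then aLoop t out (d + 1) (buf ++ [c])
    else if c = ')' then aLoop t out (max 0 (d - 1)) (buf ++ [c])
    else if c = ';' ∧ d = 0 then aLoop t (out ++ [String.ofList buf]) d []
    else aLoop t out d (buf ++ [c])

def split_declarations_py (body : String) : List String :=
  aLoop body.toList [] 0 []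

-- ===== PORT B =====
-- Source B pass 1: 'for i, ch in enumerate(body)' collecting indices of top-level semicolons.
def bScan : List (Int × Char) → Int → List Int → List Int
  | [], _, cuts => cuts
  | (i, c) :: t, d, cuts =>
    if c = '(' then bScan t (d + 1) cuts
    else if c = ')' then bScan t (max 0 (d - 1)) cuts
    else if c = ';' ∧ d = 0 then bScan t d (cuts ++ [i])
    else bScan t d cuts

-- Source B pass 2: 'for c in cuts: segs.append(body[start:c]); start = c+1' then the tail slice if non-empty.
-- String slices body[a:b] are ported as PySem.List.slice on body.toList wrapped with String.ofList (exact).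
def bSegs : List Int → Int → List Char → List String
  | [], start, cs =>
    let tail := PySem.List.slice cs (some start) none
    if tail.isEmpty then [] else [String.ofList tail]
  | c :: ms, start, cs =>
    String.ofList (PySem.List.slice cs (some start) (some c)) :: bSegs ms (c + 1) cs

def split_declarations_py_alt (body : String) : List String :=
  bSegs (bScan (PySem.List.enumerate body.toList 0) 0 []) 0 body.toList

-- ===== PRECONDITION & SPEC =====
def Spec_split_declarations_py (body : String) (out : List String) : Prop := out = split_declarations_py_alt body
instance (body : String) (out : List String) : Decidable (Spec_split_declarations_py body out) := by unfold Spec_split_declarations_py; infer_instance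

-- ===== CLAIM (what is proved, stated in full; the proofs are below) =====
def Claim_equal_split_declarations_py : Prop := ∀ (body : String), Dom_split_declarations_py body → Spec_split_declarations_py body (split_declarations_py body)

-- ===== LEMMAS AND PROOFS =====

-- Common reference: the depth update shared by both loops.
def newd (c : Char) (d : Int) : Int :=
  if c = '(' then d + 1 else if c = ')' then max 0 (d - 1) else d

-- prepend a char to the first segment (creating it if none)
def consHd (c : Char) : List (List Char) → List (List Char)
  | [] => [[c]]
  | s :: r => (c :: s) :: r

-- Reference split: the list of segments (final empty segment dropped).
def S : List Char → Int → List (List Char)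
  | [], _ => []
  | c :: t, d => if c = ';' ∧ d = 0 then [] :: S t 0 else consHd c (S t (newd c d))

-- pending buffer attached in front of the reference split
def pre (buf : List Char) : List (List Char) → List (List Char)
  | [] => if buf.isEmpty then [] else [buf]
  | s :: r => (buf ++ s) :: r

theorem pre_nil (X : List (List Char)) : pre [] X = X := by
  cases X <;> simp [pre]

theorem pre_append (buf : List Char) (c : Char) (X : List (List Char)) :
    pre (buf ++ [c]) X = pre buf (consHd c X) := by
  cases X <;> simp [pre, consHd]

theorem aLoop_eq (l : List Char) : ∀ (out : List String) (d : Int) (buf : List Char),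
    aLoop l out d buf = out ++ (pre buf (S l d)).map String.ofList := by
  induction l with
  | nil =>
    intro out d buf
    by_cases h : buf.isEmpty <;> simp_all [aLoop, S, pre]
  | cons c t ih =>
    intro out d buf
    by_cases h1 : c = '('
    · simp [aLoop, S, newd, h1, ih, pre_append, consHd]
    · by_cases h2 : c = ')'
      · simp [aLoop, S, newd, h2, ih, pre_append, consHd]
      · by_cases h3 : c = ';' ∧ d = 0
        · cases hS : S t 0 <;> simp [aLoop, S, h3, ih, pre, hS]
        · simp [aLoop, S, newd, h1, h2, h3, ih, pre_append, consHd]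

-- relative positions of the top-level semicolons
def C : List Char → Int → List Nat
  | [], _ => []
  | c :: t, d =>
    if c = ';' ∧ d = 0 then 0 :: (C t 0).map (· + 1) else (C t (newd c d)).map (· + 1)

theorem bScan_eq (l : List Char) : ∀ (k : Nat) (d : Int) (acc : List Int),
    bScan (PySem.List.enumerate l (k : Int)) d acc
      = acc ++ (C l d).map (fun n => ((n + k : Nat) : Int)) := by
  induction l with
  | nil => intro k d acc; simp [PySem.List.enumerate_nil, bScan, C]
  | cons c t ih =>
    intro k d acc
    rw [PySem.List.enumerate_cons]
    have hk : (k : Int) + 1 = ((k + 1 : Nat) : Int) := by push_cast; ring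
    by_cases h1 : c = '('
    · simp only [bScan, if_pos h1, hk, ih, C, newd]
      simp [h1, List.map_map, Function.comp_def]
      intro a _; ring
    · by_cases h2 : c = ')'
      · simp only [bScan, if_neg h1, if_pos h2, hk, ih, C, newd]
        simp [h2, List.map_map, Function.comp_def]
        intro a _; ring
      · by_cases h3 : c = ';' ∧ d = 0
        · simp only [bScan, if_neg h1, if_neg h2, if_pos h3, hk, ih, C, newd]
          simp [h3, List.map_map, Function.comp_def, List.append_assoc]
          intro a _; ring
        · simp only [bScan, if_neg h1, if_neg h2, if_neg h3, hk, ih, C, newd]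
          simp [List.map_map, Function.comp_def]
          intro a _; ring

-- list-level mirror of bSegs (Nat cuts, drop/take slices)
def bSegsL : List Nat → Nat → List Char → List (List Char)
  | [], s, cs => let tail := cs.drop s; if tail.isEmpty then [] else [tail]
  | c :: ms, s, cs => (cs.drop s).take (c - s) :: bSegsL ms (c + 1) cs

theorem bSegs_eq (ms : List Nat) : ∀ (k : Nat) (cs : List Char),
    bSegs (ms.map (fun n => ((n : Nat) : Int))) (k : Int) cs
      = (bSegsL ms k cs).map String.ofList := by
  induction ms with
  | nil =>
    intro k cs
    simp only [List.map_nil, bSegs, bSegsL, PySem.List.slice_from_natCast]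
    by_cases h : (cs.drop k).isEmpty <;> simp [h]
  | cons c ms ih =>
    intro k cs
    have hc : ((c : Int) + 1) = ((c + 1 : Nat) : Int) := by push_cast; ring
    simp only [List.map_cons, bSegs, bSegsL, PySem.List.slice_natCast, hc, ih, List.map_cons]

theorem drop_succ_of_drop_cons {cs t : List Char} {c : Char} {k : Nat}
    (h : cs.drop k = c :: t) : cs.drop (k + 1) = t := by
  have hd : List.drop 1 (List.drop k cs) = List.drop (k + 1) cs := by
    rw [List.drop_drop]
  rw [← hd, h]
  rfl

-- shifting the start of bSegsL one left past a non-cut character prepends it to the first piece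
theorem bSegsL_shift (ns : List Nat) (k : Nat) (cs t : List Char) (c : Char)
    (h : cs.drop k = c :: t) :
    bSegsL (ns.map (· + (k + 1))) k cs = consHd c (bSegsL (ns.map (· + (k + 1))) (k + 1) cs) := by
  have ht : cs.drop (k + 1) = t := drop_succ_of_drop_cons h
  cases ns with
  | nil =>
    simp only [List.map_nil, bSegsL, h, ht]
    cases t <;> simp [consHd]
  | cons n ns =>
    simp only [List.map_cons, bSegsL, h, ht, consHd]
    have h1 : n + (k + 1) - k = n + 1 := by omega
    have h2 : n + (k + 1) - (k + 1) = n := by omega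
    rw [h1, h2, List.take_succ_cons]

theorem bSegsL_C (l : List Char) : ∀ (k : Nat) (d : Int) (cs : List Char),
    cs.drop k = l → bSegsL ((C l d).map (· + k)) k cs = S l d := by
  induction l with
  | nil => intro k d cs h; simp [C, bSegsL, h, S]
  | cons c t ih =>
    intro k d cs h
    have ht : cs.drop (k + 1) = t := drop_succ_of_drop_cons h
    by_cases h3 : c = ';' ∧ d = 0
    · simp only [C, if_pos h3, S, List.map_cons, List.map_map, Function.comp_def]
      simp only [bSegsL, h, Nat.zero_add]
      have : (fun x => x + 1 + k) = (fun x => x + (k + 1)) := by funext x; omega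
      rw [this, ih (k + 1) 0 cs ht]
      simp
    · simp only [C, if_neg h3, S, List.map_map, Function.comp_def]
      have : (fun x => x + 1 + k) = (fun x => x + (k + 1)) := by funext x; omega
      rw [this, bSegsL_shift _ _ _ _ _ h, ih (k + 1) (newd c d) cs ht]

-- ===== VERDICT (by name: the statement is the Claim_ definition above) =====
theorem split_declarations_py_spec : Claim_equal_split_declarations_py := by
  intro body _
  unfold Spec_split_declarations_py split_declarations_py split_declarations_py_alt
  rw [aLoop_eq, pre_nil, show (0 : Int) = ((0 : Nat) : Int) from rfl, bScan_eq]
  simp only [Nat.add_zero, List.nil_append]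
  rw [bSegs_eq]
  simp only [Nat.cast_zero]
  have hm : C body.toList 0 = (C body.toList 0).map (· + 0) := by simp
  rw [hm, bSegsL_C body.toList 0 0 body.toList (by simp)]
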